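-- pv_equiv track=rewrite | github.com/stillbeau/issue | pricing_config.py | identify_material_type
-- ===== SOURCE A (Python) =====
-- def identify_material_type(material_description):
--     """
--     Identify the material type (quartz, granite, etc.) from description.
--     """
--     if not material_description:
--         return None
--
--     desc_lower = str(material_description).lower()
--
--     # Check for laminate indicators
--     laminate_indicators = ['wilsonart', 'formica', 'arborite', 'laminate']
--     if any(indicator in desc_lower for indicator in laminate_indicators):
--         return 'laminate'
--
--     # Check for solid surface indicators
--     solid_surface_indicators = ['corian', 'himacs', 'solid surface']
--     if any(indicator in desc_lower for indicator in solid_surface_indicators):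
--         return 'solid_surface'
--
--     # Check for granite indicators
--     granite_indicators = ['granite', 'cosentino granite']
--     if any(indicator in desc_lower for indicator in granite_indicators):
--         return 'granite'
--
--     # Check for porcelain indicators
--     porcelain_indicators = ['dekton', 'infinity', 'porcelain']
--     if any(indicator in desc_lower for indicator in porcelain_indicators):
--         return 'porcelain'
--
--     # Check for signature series indicators
--     signature_indicators = ['signature series']
--     if any(indicator in desc_lower for indicator in signature_indicators):
--         return 'signature'
--
--     # Default to quartz for most stone materials
--     quartz_indicators = ['silestone', 'caesarstone', 'hanstone', 'cambria', 'vicostone', 'quartz']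
--     if any(indicator in desc_lower for indicator in quartz_indicators):
--         return 'quartz'
--
--     return 'quartz'  # Default assumption
-- ===== SOURCE B (Python) =====
-- # Flat indicator -> (priority, label) map; one order-independent pass keeping the
-- # minimum-priority match (no early return, no grouped branch cascade); the quartz
-- # indicator group is dropped because matching it and falling through both yield 'quartz'.
-- _INDICATOR_TABLE = {
--     'arborite': (0, 'laminate'),
--     'corian': (1, 'solid_surface'),
--     'cosentino granite': (2, 'granite'),
--     'dekton': (3, 'porcelain'),
--     'formica': (0, 'laminate'),
--     'granite': (2, 'granite'),
--     'himacs': (1, 'solid_surface'),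
--     'infinity': (3, 'porcelain'),
--     'laminate': (0, 'laminate'),
--     'porcelain': (3, 'porcelain'),
--     'signature series': (4, 'signature'),
--     'solid surface': (1, 'solid_surface'),
--     'wilsonart': (0, 'laminate'),
-- }
--
-- def identify_material_type(material_description):
--     if not material_description:
--         return None
--     desc = str(material_description).lower()
--     best = None
--     for ind, (pri, label) in _INDICATOR_TABLE.items():
--         if ind in desc and (best is None or pri < best[0]):
--             best = (pri, label)
--     return best[1] if best is not None else 'quartz'
-- ===== Notes on version B (the rewrite author's own statement) =====
-- stated objective: alternative
-- what changed: Replaced the six ordered group-scan early-return branches with a flat indicator->(priority,label) map scanned once in alphabetical order while keeping the minimum-priority match in an accumulator (order-independent min instead of a priority cascade); the quartz indicator group is dropped entirely since matching it equals the default.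
import Mathlib
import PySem

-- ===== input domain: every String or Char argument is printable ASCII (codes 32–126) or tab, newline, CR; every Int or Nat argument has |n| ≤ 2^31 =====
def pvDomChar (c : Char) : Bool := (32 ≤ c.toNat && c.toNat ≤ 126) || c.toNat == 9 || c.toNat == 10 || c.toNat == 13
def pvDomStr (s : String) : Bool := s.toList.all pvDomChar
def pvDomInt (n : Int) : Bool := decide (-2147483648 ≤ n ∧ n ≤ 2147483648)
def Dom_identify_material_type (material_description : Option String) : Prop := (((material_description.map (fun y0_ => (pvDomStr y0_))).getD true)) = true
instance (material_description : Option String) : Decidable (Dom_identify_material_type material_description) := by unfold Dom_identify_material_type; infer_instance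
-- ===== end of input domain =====

-- B replaces A's six ordered group-scan branches with one pass over a flat indicator->(priority,label) table keeping the minimum-priority match (alternative decomposition; same behaviour).


-- ===== PORT A =====
def identify_material_type (material_description : Option String) : Option String :=
  match material_description with
  | none => none
  | some s =>
    if s = "" then none
    else
      let desc_lower := PySem.Str.lower s
      let laminate_indicators := ["wilsonart", "formica", "arborite", "laminate"]
      if laminate_indicators.any (fun ind => PySem.Str.isIn ind desc_lower) then some "laminate"
      else
        let solid_surface_indicators := ["corian", "himacs", "solid surface"]
        if solid_surface_indicators.any (fun ind => PySem.Str.isIn ind desc_lower) then some "solid_surface"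
        else
          let granite_indicators := ["granite", "cosentino granite"]
          if granite_indicators.any (fun ind => PySem.Str.isIn ind desc_lower) then some "granite"
          else
            let porcelain_indicators := ["dekton", "infinity", "porcelain"]
            if porcelain_indicators.any (fun ind => PySem.Str.isIn ind desc_lower) then some "porcelain"
            else
              let signature_indicators := ["signature series"]
              if signature_indicators.any (fun ind => PySem.Str.isIn ind desc_lower) then some "signature"
              else
                let quartz_indicators := ["silestone", "caesarstone", "hanstone", "cambria", "vicostone", "quartz"]
                if quartz_indicators.any (fun ind => PySem.Str.isIn ind desc_lower) then some "quartz"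
                else some "quartz"

-- ===== PORT B =====
-- flat dict of Source B, as an association list in insertion (alphabetical) order
def indicatorTable : List (String × Int × String) :=
  [("arborite", 0, "laminate"),
   ("corian", 1, "solid_surface"),
   ("cosentino granite", 2, "granite"),
   ("dekton", 3, "porcelain"),
   ("formica", 0, "laminate"),
   ("granite", 2, "granite"),
   ("himacs", 1, "solid_surface"),
   ("infinity", 3, "porcelain"),
   ("laminate", 0, "laminate"),
   ("porcelain", 3, "porcelain"),
   ("signature series", 4, "signature"),
   ("solid surface", 1, "solid_surface"),
   ("wilsonart", 0, "laminate")]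

-- the for-loop of Source B: keep the minimum-priority matching entry in `best`
def bestStep (desc : String) (best : Option (Int × String)) (e : String × Int × String) : Option (Int × String) :=
  if PySem.Str.isIn e.1 desc && (match best with | none => true | some b => decide (e.2.1 < b.1)) then
    some e.2
  else best

def identify_material_type_alt (material_description : Option String) : Option String :=
  match material_description with
  | none => none
  | some s =>
    if s = "" then none
    else
      let desc := PySem.Str.lower s
      match indicatorTable.foldl (bestStep desc) none with
      | some b => some b.2
      | none => some "quartz"

-- ===== PRECONDITION & SPEC =====
def Spec_identify_material_type (material_description : Option String) (out : Option String) : Prop := out = identify_material_type_alt material_description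
instance (material_description : Option String) (out : Option String) : Decidable (Spec_identify_material_type material_description out) := by unfold Spec_identify_material_type; infer_instance

-- ===== CLAIM =====
def Claim_equal_identify_material_type : Prop := ∀ (material_description : Option String), Dom_identify_material_type material_description → Spec_identify_material_type material_description (identify_material_type material_description)

-- ===== LEMMAS AND PROOFS =====

-- proof-only shapes: A's branch cascade and B's min-fold, abstracted over the 13 membership booleans
def aShape (bw bf ba bl bc bh bss bg bcg bd bi bp bsig : Bool) : Option String :=
  if (bw || (bf || (ba || (bl || false)))) = true then some "laminate"
  else if (bc || (bh || (bss || false))) = true then some "solid_surface"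
  else if (bg || (bcg || false)) = true then some "granite"
  else if (bd || (bi || (bp || false))) = true then some "porcelain"
  else if (bsig || false) = true then some "signature"
  else some "quartz"

def bStep (b : Bool) (e : Int × String) (best : Option (Int × String)) : Option (Int × String) :=
  if b && (match best with | none => true | some p => decide (e.1 < p.1)) then some e else best

def bShape (bw bf ba bl bc bh bss bg bcg bd bi bp bsig : Bool) : Option String :=
  match bStep bw (0, "laminate") (bStep bss (1, "solid_surface") (bStep bsig (4, "signature")
        (bStep bp (3, "porcelain") (bStep bl (0, "laminate") (bStep bi (3, "porcelain")
        (bStep bh (1, "solid_surface") (bStep bg (2, "granite") (bStep bf (0, "laminate")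
        (bStep bd (3, "porcelain") (bStep bcg (2, "granite") (bStep bc (1, "solid_surface")
        (bStep ba (0, "laminate") none)))))))))))) with
  | some b => some b.2
  | none => some "quartz"

theorem shape_eq : ∀ (bw bf ba bl bc bh bss bg bcg bd bi bp bsig : Bool),
    aShape bw bf ba bl bc bh bss bg bcg bd bi bp bsig
      = bShape bw bf ba bl bc bh bss bg bcg bd bi bp bsig := by decide

theorem fold_eq_chain (d : String) :
    List.foldl (bestStep d) none indicatorTable
      = bStep (PySem.Str.isIn "wilsonart" d) (0,"laminate") (bStep (PySem.Str.isIn "solid surface" d) (1,"solid_surface") (bStep (PySem.Str.isIn "signature series" d) (4,"signature") (bStep (PySem.Str.isIn "porcelain" d) (3,"porcelain") (bStep (PySem.Str.isIn "laminate" d) (0,"laminate") (bStep (PySem.Str.isIn "infinity" d) (3,"porcelain") (bStep (PySem.Str.isIn "himacs" d) (1,"solid_surface") (bStep (PySem.Str.isIn "granite" d) (2,"granite") (bStep (PySem.Str.isIn "formica" d) (0,"laminate") (bStep (PySem.Str.isIn "dekton" d) (3,"porcelain") (bStep (PySem.Str.isIn "cosentino granite" d) (2,"granite") (bStep (PySem.Str.isIn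 "corian" d) (1,"solid_surface") (bStep (PySem.Str.isIn "arborite" d) (0,"laminate") none)))))))))))) := rfl

theorem aChar (s : String) (hs : ¬ s = "") :
    identify_material_type (some s)
      = aShape (PySem.Str.isIn "wilsonart" (PySem.Str.lower s)) (PySem.Str.isIn "formica" (PySem.Str.lower s)) (PySem.Str.isIn "arborite" (PySem.Str.lower s)) (PySem.Str.isIn "laminate" (PySem.Str.lower s)) (PySem.Str.isIn "corian" (PySem.Str.lower s)) (PySem.Str.isIn "himacs" (PySem.Str.lower s)) (PySem.Str.isIn "solid surface" (PySem.Str.lower s)) (PySem.Str.isIn "granite" (PySem.Str.lower s)) (PySem.Str.isIn "cosentino granite" (PySem.Str.lower s)) (PySem.Str.isIn "dekton" (PySem.Str.lower s)) (PySem.Str.isIn "infinity" (PySem.Str.lower s)) (PySem.Str.isIn "porcelain" (PySem.Str.lower s)) (PySem.Str.isIn "signature series" (PySem.Str.lower s)) := by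
  simp only [identify_material_type, if_neg hs, ite_self]
  rfl

theorem bChar (s : String) (hs : ¬ s = "") :
    identify_material_type_alt (some s)
      = bShape (PySem.Str.isIn "wilsonart" (PySem.Str.lower s)) (PySem.Str.isIn "formica" (PySem.Str.lower s)) (PySem.Str.isIn "arborite" (PySem.Str.lower s)) (PySem.Str.isIn "laminate" (PySem.Str.lower s)) (PySem.Str.isIn "corian" (PySem.Str.lower s)) (PySem.Str.isIn "himacs" (PySem.Str.lower s)) (PySem.Str.isIn "solid surface" (PySem.Str.lower s)) (PySem.Str.isIn "granite" (PySem.Str.lower s)) (PySem.Str.isIn "cosentino granite" (PySem.Str.lower s)) (PySem.Str.isIn "dekton" (PySem.Str.lower s)) (PySem.Str.isIn "infinity" (PySem.Str.lower s)) (PySem.Str.isIn "porcelain" (PySem.Str.lower s)) (PySem.Str.isIn "signature series" (PySem.Str.lower s)) := by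
  simp only [identify_material_type_alt, if_neg hs]
  rw [fold_eq_chain]
  rfl

-- ===== VERDICT =====
theorem identify_material_type_spec : Claim_equal_identify_material_type := by
  intro md _
  match md with
  | none => rfl
  | some s =>
    by_cases hs : s = ""
    · simp [Spec_identify_material_type, identify_material_type, identify_material_type_alt, hs]
    · show identify_material_type (some s) = identify_material_type_alt (some s)
      rw [aChar s hs, bChar s hs, shape_eq]
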